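-- pv_equiv track=rewrite | github.com/SLDatCMU/BLE_Campus_Mobility_Sensing | pair_degree_count.py | count_flow
-- ===== SOURCE A (Python) =====
-- def count_flow(node,pair_count):
-- 	flow = {}
-- 	for node_i in node:
-- 		for node_j in node:
-- 			node_tuple = (node_i,node_j)
-- 			flow[node_tuple] = 0
-- 			flow[node_tuple] += count_flow_helper(node_i,node_j,pair_count)
-- 	return flow
--
-- def count_flow_helper(node_i,node_j,pair_count):
-- 	count = 0
-- 	pair_string = str(node_i) + '->' + str(node_j)
-- 	pair_string_1 = str(node_j) + '->' + str(node_i)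
-- 	if pair_string in pair_count.keys():
-- 		count += pair_count[pair_string]
-- 	if pair_string_1 in pair_count.keys():
-- 		count += pair_count[pair_string_1]
-- 	return count
-- ===== SOURCE B (Python) =====
-- def count_flow(node, pair_count):
--     # scatter: initialize every ordered pair to 0, build a key->pair map once,
--     # then make ONE pass over pair_count distributing each count to both directions
--     flow = {(i, j): 0 for i in node for j in node}
--     smap = {str(i) + '->' + str(j): (i, j) for i in node for j in node}
--     for key, v in pair_count.items():
--         if key in smap:
--             i, j = smap[key]
--             flow[(i, j)] += v
--             flow[(j, i)] += v
--     return flow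
-- ===== Notes on version B (the rewrite author's own statement) =====
-- stated objective: alternative
-- what changed: A gathers: for every ordered node pair it builds both 'i->j' and 'j->i' strings and looks each up in pair_count; B scatters: it zero-initializes all pairs and a key->pair map once, then makes a single pass over pair_count.items() adding each count to both directions of its pair.
import Mathlib
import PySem

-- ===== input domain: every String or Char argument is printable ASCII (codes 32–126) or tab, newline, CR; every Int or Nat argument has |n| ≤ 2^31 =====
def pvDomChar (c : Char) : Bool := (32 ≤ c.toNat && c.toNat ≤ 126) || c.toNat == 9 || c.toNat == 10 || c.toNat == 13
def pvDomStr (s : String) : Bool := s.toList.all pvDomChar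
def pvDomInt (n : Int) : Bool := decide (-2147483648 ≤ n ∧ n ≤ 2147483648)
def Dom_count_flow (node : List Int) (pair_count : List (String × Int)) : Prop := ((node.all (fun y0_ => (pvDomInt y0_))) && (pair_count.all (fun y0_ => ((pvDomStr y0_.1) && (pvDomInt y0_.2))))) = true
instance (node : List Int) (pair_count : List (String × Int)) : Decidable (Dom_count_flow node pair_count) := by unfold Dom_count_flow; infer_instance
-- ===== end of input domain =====

-- B replaces A's per-pair gather (two string keys built and looked up for every ordered pair)
-- by one scatter pass over pair_count through a precomputed key→pair map; equal return values.
-- Dict keys are handled as their character lists (PySem.Chars), so building and comparing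
-- Python's str(i)+'->'+str(j) is exact; cfKey below is that key (used by both ports).
def cfKey (i j : Int) : List Char := PySem.Int.toChars i ++ '-' :: '>' :: PySem.Int.toChars j

-- ===== PORT A =====
def count_flow_helper (node_i node_j : Int) (pair_count : PySem.Dict (List Char) Int) : Int :=
  let count : Int := 0
  let pair_string := cfKey node_i node_j
  let pair_string_1 := cfKey node_j node_i
  let count := if pair_count.contains pair_string then count + pair_count.getD pair_string 0 else count
  let count := if pair_count.contains pair_string_1 then count + pair_count.getD pair_string_1 0 else count
  count

def count_flow (node : List Int) (pair_count : List (String × Int)) : List (Int × Int × Int) :=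
  let pc : PySem.Dict (List Char) Int := PySem.Dict.ofList (pair_count.map (fun p => (p.1.toList, p.2)))
  let flow : PySem.Dict (Int × Int) Int :=
    node.foldl (fun flow node_i =>
      node.foldl (fun flow node_j =>
        let node_tuple := (node_i, node_j)
        let flow := flow.insert node_tuple 0
        flow.modify node_tuple 0 (· + count_flow_helper node_i node_j pc)) flow) PySem.Dict.empty
  flow.items.map (fun p => (p.1.1, p.1.2, p.2))

-- ===== PORT B =====
def count_flow_alt (node : List Int) (pair_count : List (String × Int)) : List (Int × Int × Int) :=
  let pc : PySem.Dict (List Char) Int := PySem.Dict.ofList (pair_count.map (fun p => (p.1.toList, p.2)))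
  let flow0 : PySem.Dict (Int × Int) Int :=
    node.foldl (fun f i => node.foldl (fun f j => f.insert (i, j) 0) f) PySem.Dict.empty
  let smap : PySem.Dict (List Char) (Int × Int) :=
    node.foldl (fun d i => node.foldl (fun d j => d.insert (cfKey i j) (i, j)) d) PySem.Dict.empty
  let flow : PySem.Dict (Int × Int) Int :=
    pc.items.foldl (fun f kv =>
      match smap.get? kv.1 with
      | some (i, j) => (f.modify (i, j) 0 (· + kv.2)).modify (j, i) 0 (· + kv.2)
      | none => f) flow0
  flow.items.map (fun p => (p.1.1, p.1.2, p.2))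

-- ===== PRECONDITION & SPEC =====
def Spec_count_flow (node : List Int) (pair_count : List (String × Int)) (out : List (Int × Int × Int)) : Prop := out = count_flow_alt node pair_count
instance (node : List Int) (pair_count : List (String × Int)) (out : List (Int × Int × Int)) : Decidable (Spec_count_flow node pair_count out) := by unfold Spec_count_flow; infer_instance

-- ===== CLAIM (what is proved, stated in full; the proofs are below) =====
def Claim_equal_count_flow : Prop := ∀ (node : List Int) (pair_count : List (String × Int)), Dom_count_flow node pair_count → Spec_count_flow node pair_count (count_flow node pair_count)

-- ===== LEMMAS AND PROOFS =====

/- ## decimal digit characters (Nat.toDigits) -/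

theorem pvToDigitsCore_succ (b f n : Nat) (ds : List Char) :
    Nat.toDigitsCore b (f+1) n ds =
      if n / b = 0 then (n % b).digitChar :: ds
      else Nat.toDigitsCore b f (n / b) ((n % b).digitChar :: ds) := by
  conv_lhs => rw [Nat.toDigitsCore]

theorem pvToDigitsCore_mem (f : Nat) : ∀ (n : Nat) (acc : List Char) (c : Char),
    c ∈ Nat.toDigitsCore 10 f n acc → c ∈ acc ∨ ∃ d, d < 10 ∧ c = Nat.digitChar d := by
  induction f with
  | zero => intro n acc c h; exact Or.inl h
  | succ f ih =>
    intro n acc c h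
    rw [pvToDigitsCore_succ] at h
    split at h
    · rcases List.mem_cons.1 h with h | h
      · exact Or.inr ⟨n % 10, Nat.mod_lt _ (by norm_num), h⟩
      · exact Or.inl h
    · rcases ih _ _ _ h with h | h
      · rcases List.mem_cons.1 h with h | h
        · exact Or.inr ⟨n % 10, Nat.mod_lt _ (by norm_num), h⟩
        · exact Or.inl h
      · exact Or.inr h

theorem pvToDigitsCore_eq (f : Nat) : ∀ (n : Nat) (acc : List Char), n ≠ 0 → n ≤ f →
    Nat.toDigitsCore 10 f n acc = ((Nat.digits 10 n).map Nat.digitChar).reverse ++ acc := by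
  induction f with
  | zero => intro n acc h hle; omega
  | succ f ih =>
    intro n acc h hle
    rw [pvToDigitsCore_succ]
    rw [Nat.digits_def' (by norm_num : (1:Nat) < 10) (Nat.pos_of_ne_zero h)]
    split
    · rename_i h0
      rw [h0, Nat.digits_zero]
      simp
    · rename_i h0
      rw [ih (n / 10) _ h0 (by omega : n / 10 ≤ f)]
      simp

theorem pvToDigits_eq (n : Nat) (h : n ≠ 0) :
    Nat.toDigits 10 n = ((Nat.digits 10 n).map Nat.digitChar).reverse := by
  have := pvToDigitsCore_eq (n+1) n [] h (by omega)
  simpa [Nat.toDigits] using this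

theorem pvToDigits_mem (n : Nat) (c : Char) (h : c ∈ Nat.toDigits 10 n) :
    ∃ d, d < 10 ∧ c = Nat.digitChar d := by
  rcases pvToDigitsCore_mem (n+1) n [] c (by simpa [Nat.toDigits] using h) with h | h
  · simp at h
  · exact h

theorem pvMapDC_inj : ∀ (l1 l2 : List Nat), (∀ x ∈ l1, x < 10) → (∀ x ∈ l2, x < 10) →
    l1.map Nat.digitChar = l2.map Nat.digitChar → l1 = l2 := by
  intro l1
  induction l1 with
  | nil => intro l2 _ _ h; cases l2 <;> simp_all
  | cons a l ih =>
    intro l2 h1 h2 h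
    cases l2 with
    | nil => simp at h
    | cons b l2 =>
      simp only [List.map_cons, List.cons.injEq] at h
      have hab : a = b := by
        have := h1 a (by simp); have := h2 b (by simp)
        revert h
        have : ∀ x < 10, ∀ y < 10, Nat.digitChar x = Nat.digitChar y → x = y := by decide
        intro h; exact this a ‹a < 10› b ‹b < 10› h.1
      exact by rw [hab, ih l2 (fun x hx => h1 x (by simp [hx])) (fun x hx => h2 x (by simp [hx])) h.2]

theorem pvToDigits_inj : ∀ (a b : Nat), Nat.toDigits 10 a = Nat.toDigits 10 b → a = b := by
  have zero_case : ∀ b : Nat, b ≠ 0 → Nat.toDigits 10 0 ≠ Nat.toDigits 10 b := by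
    intro b hb h
    have h0 : Nat.toDigits 10 0 = ['0'] := by decide
    rw [h0, pvToDigits_eq b hb] at h
    have hd : (Nat.digits 10 b).map Nat.digitChar = ['0'] := by
      have := congrArg List.reverse h; simpa using this.symm
    have hlen : Nat.digits 10 b ≠ [] := Nat.digits_ne_nil_iff_ne_zero.2 hb
    cases hdig : Nat.digits 10 b with
    | nil => exact hlen hdig
    | cons d tl =>
      rw [hdig] at hd
      cases tl with
      | cons _ _ => simp at hd
      | nil =>
        simp only [List.map_cons, List.map_nil, List.cons.injEq] at hd
        have hd10 : d < 10 := Nat.digits_lt_base' (b := 8) (m := b) (by rw [hdig]; exact List.mem_cons_self ..)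
        have : d = 0 := by
          revert hd
          have : ∀ x < 10, Nat.digitChar x = '0' → x = 0 := by decide
          intro hd; exact this d hd10 hd.1
        have hlast := Nat.getLast_digit_ne_zero 10 hb
        apply hlast
        simp [hdig, this]
  intro a b h
  by_cases ha : a = 0 <;> by_cases hb : b = 0
  · omega
  · exact absurd (ha ▸ h) (zero_case b hb)
  · exact absurd (hb ▸ h.symm) (zero_case a ha)
  · have := pvToDigits_eq a ha ▸ pvToDigits_eq b hb ▸ h
    rw [pvToDigits_eq a ha, pvToDigits_eq b hb] at h
    have hm : (Nat.digits 10 a).map Nat.digitChar = (Nat.digits 10 b).map Nat.digitChar := by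
      have := congrArg List.reverse h; simpa using this
    have hdig : Nat.digits 10 a = Nat.digits 10 b :=
      pvMapDC_inj _ _ (fun x hx => Nat.digits_lt_base' (b := 8) (m := a) hx)
        (fun x hx => Nat.digits_lt_base' (b := 8) (m := b) hx) hm
    calc a = Nat.ofDigits 10 (Nat.digits 10 a) := (Nat.ofDigits_digits 10 a).symm
    _ = Nat.ofDigits 10 (Nat.digits 10 b) := by rw [hdig]
    _ = b := Nat.ofDigits_digits 10 b

theorem pvGt_not_mem_toDigits (n : Nat) : '>' ∉ Nat.toDigits 10 n := by
  intro h
  rcases pvToDigits_mem n _ h with ⟨d, hd, he⟩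
  revert he
  have : ∀ x < 10, Nat.digitChar x ≠ '>' := by decide
  exact fun he => this d hd he.symm

theorem pvDash_not_mem_toDigits (n : Nat) : '-' ∉ Nat.toDigits 10 n := by
  intro h
  rcases pvToDigits_mem n _ h with ⟨d, hd, he⟩
  revert he
  have : ∀ x < 10, Nat.digitChar x ≠ '-' := by decide
  exact fun he => this d hd he.symm

theorem pvGt_not_mem_toChars (n : Int) : '>' ∉ PySem.Int.toChars n := by
  unfold PySem.Int.toChars
  split
  · intro h
    rcases List.mem_cons.1 h with h | h
    · exact absurd h (by decide)
    · exact pvGt_not_mem_toDigits _ h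
  · exact pvGt_not_mem_toDigits _

theorem pvToChars_inj : ∀ (a b : Int), PySem.Int.toChars a = PySem.Int.toChars b → a = b := by
  intro a b h
  unfold PySem.Int.toChars at h
  split at h <;> split at h
  · rename_i ha hb
    simp only [List.cons.injEq] at h
    have := pvToDigits_inj _ _ h.2
    omega
  · rename_i ha hb
    exact absurd (h ▸ List.mem_cons_self ..) (pvDash_not_mem_toDigits _)
  · rename_i ha hb
    exact absurd (h ▸ List.mem_cons_self ..) (pvDash_not_mem_toDigits _)
  · rename_i ha hb
    have := pvToDigits_inj _ _ h
    omega

theorem pvMarker_aux : ∀ (c' : List Char), '>' ∉ c' → ∀ (b d : List Char),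
    '>' :: b = c' ++ '-' :: '>' :: d → False := by
  intro c' hc b d h
  cases c' with
  | nil => simp at h
  | cons y c'' =>
    simp only [List.cons_append, List.cons.injEq] at h
    exact hc (by simp [h.1.symm])

theorem pvMarker_inj : ∀ (a c : List Char), '>' ∉ a → '>' ∉ c → ∀ (b d : List Char),
    a ++ '-' :: '>' :: b = c ++ '-' :: '>' :: d → a = c ∧ b = d := by
  intro a
  induction a with
  | nil =>
    intro c _ hc b d h
    cases c with
    | nil => simpa using h
    | cons x c' =>
      simp only [List.nil_append, List.cons_append, List.cons.injEq] at h
      exact absurd h.2 (fun hh => pvMarker_aux c' (fun hm => hc (List.mem_cons_of_mem _ hm)) b d hh)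
  | cons x a' ih =>
    intro c ha hc b d h
    cases c with
    | nil =>
      simp only [List.cons_append, List.nil_append, List.cons.injEq] at h
      exact absurd h.2.symm (fun hh => pvMarker_aux a' (fun hm => ha (List.mem_cons_of_mem _ hm)) d b hh)
    | cons z c' =>
      simp only [List.cons_append, List.cons.injEq] at h
      have := ih c' (fun hm => ha (List.mem_cons_of_mem _ hm)) (fun hm => hc (List.mem_cons_of_mem _ hm)) b d h.2
      exact ⟨by rw [h.1, this.1], this.2⟩

theorem pvCfKey_inj (p q a b : Int) (h : cfKey p q = cfKey a b) : p = a ∧ q = b := by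
  unfold cfKey at h
  have := pvMarker_inj _ _ (pvGt_not_mem_toChars p) (pvGt_not_mem_toChars a) _ _ h
  exact ⟨pvToChars_inj _ _ this.1, pvToChars_inj _ _ this.2⟩

theorem pvFold_get?_pres {κ ν β : Type} [BEq κ] [LawfulBEq κ] [DecidableEq κ] (l : List β) (kf : β → κ) (vf : β → ν)
    (d : PySem.Dict κ ν) (a : κ) (h : ∀ x ∈ l, kf x ≠ a) :
    (l.foldl (fun d x => d.insert (kf x) (vf x)) d).get? a = d.get? a := by
  induction l generalizing d with
  | nil => rfl
  | cons x l ih =>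
    simp only [List.foldl_cons]
    rw [ih _ (fun y hy => h y (List.mem_cons_of_mem _ hy)), PySem.Dict.get?_insert,
      if_neg (fun he => h x (List.mem_cons_self ..) he.symm)]

theorem pvFold_get?_hit {κ ν β : Type} [BEq κ] [LawfulBEq κ] [DecidableEq κ] (l : List β) (kf : β → κ) (vf : β → ν)
    (hinj : ∀ x y, kf x = kf y → x = y) (d : PySem.Dict κ ν) (x : β) (hx : x ∈ l) :
    (l.foldl (fun d x => d.insert (kf x) (vf x)) d).get? (kf x) = some (vf x) := by
  induction l generalizing d with
  | nil => simp at hx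
  | cons y l ih =>
    simp only [List.foldl_cons]
    by_cases hmem : x ∈ l
    · exact ih _ hmem
    · have hxy : x = y := by
        rcases List.mem_cons.1 hx with h | h
        · exact h
        · exact absurd h hmem
      subst hxy
      rw [pvFold_get?_pres l kf vf _ _ (fun z hz he => hmem (hinj z x he ▸ hz))]
      exact PySem.Dict.get?_insert_self _ _ _

theorem pvFold_get?_inv {κ ν β : Type} [BEq κ] [LawfulBEq κ] [DecidableEq κ] (l : List β) (kf : β → κ) (vf : β → ν)
    (d : PySem.Dict κ ν) (a : κ) (w : ν)
    (h : (l.foldl (fun d x => d.insert (kf x) (vf x)) d).get? a = some w) :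
    (∃ x ∈ l, a = kf x ∧ w = vf x) ∨ d.get? a = some w := by
  induction l generalizing d with
  | nil => exact Or.inr h
  | cons x l ih =>
    simp only [List.foldl_cons] at h
    rcases ih _ h with h' | h'
    · rcases h' with ⟨y, hy, hk, hv⟩
      exact Or.inl ⟨y, List.mem_cons_of_mem _ hy, hk, hv⟩
    · rw [PySem.Dict.get?_insert] at h'
      by_cases he : a = kf x
      · rw [if_pos he] at h'
        exact Or.inl ⟨x, List.mem_cons_self .., he, (Option.some.injEq _ _ ▸ h').symm⟩
      · rw [if_neg he] at h'
        exact Or.inr h'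

theorem pvFold_getD {κ : Type} [BEq κ] [LawfulBEq κ] [DecidableEq κ] (l : List κ) (g : κ → Int)
    (d : PySem.Dict κ Int) (t : κ) :
    (l.foldl (fun f x => f.insert x (g x)) d).getD t 0 = if t ∈ l then g t else d.getD t 0 := by
  induction l generalizing d with
  | nil => simp
  | cons x l ih =>
    simp only [List.foldl_cons, ih, PySem.Dict.getD_insert, List.mem_cons]
    by_cases h1 : t ∈ l <;> by_cases h2 : t = x <;> simp [h1, h2]

def pairsL (node : List Int) : List (Int × Int) := node.flatMap (fun i => node.map (fun j => (i, j)))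

theorem pvMem_pairsL (node : List Int) (t : Int × Int) :
    t ∈ pairsL node ↔ t.1 ∈ node ∧ t.2 ∈ node := by
  cases t with
  | mk a b => simp [pairsL, List.mem_flatMap, and_comm]

theorem pvLookup_sum (L : List (List Char × Int)) (k : List Char) (h : (L.map Prod.fst).Nodup) :
    (if (PySem.Dict.mk L).contains k then (PySem.Dict.mk L).getD k 0 else 0)
      = (L.map (fun kv => if kv.1 = k then kv.2 else 0)).sum := by
  induction L with
  | nil => simp [PySem.Dict.contains_mk]
  | cons kv L ih =>
    simp only [List.map_cons, List.nodup_cons] at h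
    simp only [List.map_cons, List.sum_cons]
    rw [← ih h.2]
    by_cases he : kv.1 = k
    · have hcon : (PySem.Dict.mk (kv :: L)).contains k = true := by
        simp [PySem.Dict.contains_mk, List.any_cons, he]
      rw [if_pos hcon, if_pos he]
      have hnc : (PySem.Dict.mk L).contains k = false := by
        simp only [PySem.Dict.contains_mk, List.any_eq_false]
        intro p hp
        simp only [beq_iff_eq]
        intro hpk
        have hk1 : kv.1 = p.1 := by rw [he, hpk]
        exact h.1 (by rw [hk1]; exact List.mem_map_of_mem hp)
      rw [if_neg (by simp [hnc])]
      have : (PySem.Dict.mk (kv :: L)).getD k 0 = kv.2 := by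
        rw [PySem.Dict.getD_eq_get?_getD, PySem.Dict.get?_mk_cons, if_pos (by simp [he])]
        rfl
      rw [this]; ring
    · have : (PySem.Dict.mk (kv :: L)).contains k = (PySem.Dict.mk L).contains k := by
        simp [PySem.Dict.contains_mk, List.any_cons, he]
      rw [this, if_neg he]
      have hg : (PySem.Dict.mk (kv :: L)).getD k 0 = (PySem.Dict.mk L).getD k 0 := by
        rw [PySem.Dict.getD_eq_get?_getD, PySem.Dict.get?_mk_cons, if_neg (by simp [he]),
          ← PySem.Dict.getD_eq_get?_getD]
      rw [hg]; ring

/- ## Proof-side abbreviations -/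

def pvPC (pair_count : List (String × Int)) : PySem.Dict (List Char) Int :=
  PySem.Dict.ofList (pair_count.map (fun p => (p.1.toList, p.2)))

def pvAD (node : List Int) (pc : PySem.Dict (List Char) Int) : PySem.Dict (Int × Int) Int :=
  node.foldl (fun f i => node.foldl (fun f j => f.insert (i, j) (0 + count_flow_helper i j pc)) f) PySem.Dict.empty

def pvFlow0 (node : List Int) : PySem.Dict (Int × Int) Int :=
  node.foldl (fun f i => node.foldl (fun f j => f.insert (i, j) 0) f) PySem.Dict.empty

def pvSmap (node : List Int) : PySem.Dict (List Char) (Int × Int) :=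
  node.foldl (fun d i => node.foldl (fun d j => d.insert (cfKey i j) (i, j)) d) PySem.Dict.empty

theorem pvAD_flat (node : List Int) (pc : PySem.Dict (List Char) Int) :
    pvAD node pc = (pairsL node).foldl (fun f t => f.insert t (0 + count_flow_helper t.1 t.2 pc)) PySem.Dict.empty := by
  simp only [pvAD, pairsL, List.foldl_flatMap, List.foldl_map]

theorem pvFlow0_flat (node : List Int) :
    pvFlow0 node = (pairsL node).foldl (fun f t => f.insert t 0) PySem.Dict.empty := by
  simp only [pvFlow0, pairsL, List.foldl_flatMap, List.foldl_map]

theorem pvSmap_flat (node : List Int) :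
    pvSmap node = (pairsL node).foldl (fun d t => d.insert (cfKey t.1 t.2) t) PySem.Dict.empty := by
  simp only [pvSmap, pairsL, List.foldl_flatMap, List.foldl_map]

def pvStep (node : List Int) (f : PySem.Dict (Int × Int) Int) (kv : List Char × Int) :
    PySem.Dict (Int × Int) Int :=
  match (pvSmap node).get? kv.1 with
  | some (i, j) => (f.modify (i, j) 0 (· + kv.2)).modify (j, i) 0 (· + kv.2)
  | none => f

def pvBD (node : List Int) (pc : PySem.Dict (List Char) Int) : PySem.Dict (Int × Int) Int :=
  pc.items.foldl (pvStep node) (pvFlow0 node)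

def pvC (node : List Int) (kv : List Char × Int) (t : Int × Int) : Int :=
  match (pvSmap node).get? kv.1 with
  | some w => (if t = w then kv.2 else 0) + (if t = (w.2, w.1) then kv.2 else 0)
  | none => 0

/- ## The two ports compute their dicts -/

theorem pvStepA (d : PySem.Dict (Int × Int) Int) (t : Int × Int) (x : Int) :
    (d.insert t 0).modify t 0 (· + x) = d.insert t (0 + x) := by
  simp [PySem.Dict.modify, PySem.Dict.getD_insert_self, PySem.Dict.insert_insert_self]

theorem pvCount_flow_eq (node : List Int) (pair_count : List (String × Int)) :
    count_flow node pair_count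
      = (pvAD node (pvPC pair_count)).items.map (fun p => (p.1.1, p.1.2, p.2)) := by
  simp only [count_flow, pvAD, pvPC, pvStepA]

theorem pvCount_flow_alt_eq (node : List Int) (pair_count : List (String × Int)) :
    count_flow_alt node pair_count
      = (pvBD node (pvPC pair_count)).items.map (fun p => (p.1.1, p.1.2, p.2)) := by
  rfl

/- ## smap characterization -/

theorem pvSmap_hit (node : List Int) (t : Int × Int) (ht : t ∈ pairsL node) :
    (pvSmap node).get? (cfKey t.1 t.2) = some t := by
  rw [pvSmap_flat]
  exact pvFold_get?_hit (pairsL node) (fun t => cfKey t.1 t.2) id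
    (fun x y h => by
      obtain ⟨h1, h2⟩ := pvCfKey_inj _ _ _ _ h
      exact Prod.ext h1 h2) _ t ht

theorem pvSmap_inv (node : List Int) (a : List Char) (w : Int × Int)
    (h : (pvSmap node).get? a = some w) : w ∈ pairsL node ∧ a = cfKey w.1 w.2 := by
  rw [pvSmap_flat] at h
  rcases pvFold_get?_inv (pairsL node) (fun t => cfKey t.1 t.2) id _ _ _ h with ⟨x, hx, hk, hv⟩ | h'
  · subst hv; exact ⟨hx, hk⟩
  · rw [PySem.Dict.get?_empty] at h'; cases h'

/- ## one scatter step -/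

theorem pvStep_keys_getD (node : List Int) (f : PySem.Dict (Int × Int) Int)
    (hf : ∀ u ∈ pairsL node, f.contains u = true) (kv : List Char × Int) :
    (pvStep node f kv).keys = f.keys ∧
      ∀ t, (pvStep node f kv).getD t 0 = f.getD t 0 + pvC node kv t := by
  unfold pvStep pvC
  cases h : (pvSmap node).get? kv.1 with
  | none => simp
  | some w =>
    obtain ⟨i, j⟩ := w
    obtain ⟨hw, -⟩ := pvSmap_inv node _ _ h
    have hij : (i, j) ∈ pairsL node := hw
    have hji : (j, i) ∈ pairsL node := by
      rw [pvMem_pairsL] at hij ⊢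
      exact ⟨hij.2, hij.1⟩
    have hc1 : f.contains (i, j) = true := hf _ hij
    have hkeys1 : (f.modify (i, j) 0 (· + kv.2)).keys = f.keys := by
      rw [PySem.Dict.keys_modify]
      exact PySem.Dict.keys_insert_of_contains f _ hc1
    have hc2 : (f.modify (i, j) 0 (· + kv.2)).contains (j, i) = true := by
      rw [PySem.Dict.contains_iff_mem_keys, hkeys1, ← PySem.Dict.contains_iff_mem_keys]
      exact hf _ hji
    constructor
    · rw [PySem.Dict.keys_modify, PySem.Dict.keys_insert_of_contains _ _ hc2, hkeys1]
    · intro t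
      rw [PySem.Dict.getD_modify, PySem.Dict.getD_modify]
      dsimp only
      by_cases h1 : t = (j, i) <;> by_cases h2 : t = (i, j)
      · subst h2; simp [← h1]; try ring
      · subst h1; simp [h2]; try ring
      · subst h2; simp [h1]; try ring
      · simp [h1, h2]
        rw [PySem.Dict.getD_modify, if_neg h2]

/- ## the scatter fold -/

theorem pvScatter (node : List Int) (L : List (List Char × Int)) :
    ∀ (f : PySem.Dict (Int × Int) Int), (∀ u ∈ pairsL node, f.contains u = true) →
      (L.foldl (pvStep node) f).keys = f.keys ∧
        ∀ t, (L.foldl (pvStep node) f).getD t 0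
          = f.getD t 0 + (L.map (fun kv => pvC node kv t)).sum := by
  induction L with
  | nil => intro f hf; simp
  | cons kv L ih =>
    intro f hf
    obtain ⟨hk, hv⟩ := pvStep_keys_getD node f hf kv
    have hf' : ∀ u ∈ pairsL node, (pvStep node f kv).contains u = true := by
      intro u hu
      rw [PySem.Dict.contains_iff_mem_keys, hk, ← PySem.Dict.contains_iff_mem_keys]
      exact hf u hu
    obtain ⟨ihk, ihv⟩ := ih (pvStep node f kv) hf'
    refine ⟨by simpa [hk] using ihk, fun t => ?_⟩
    simp only [List.foldl_cons, List.map_cons, List.sum_cons]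
    rw [ihv t, hv t]
    ring

/- ## value bridge -/

theorem pvHelper_eq (i j : Int) (pc : PySem.Dict (List Char) Int) :
    count_flow_helper i j pc
      = (if pc.contains (cfKey i j) then pc.getD (cfKey i j) 0 else 0)
        + (if pc.contains (cfKey j i) then pc.getD (cfKey j i) 0 else 0) := by
  unfold count_flow_helper
  by_cases c1 : pc.contains (cfKey i j) <;> by_cases c2 : pc.contains (cfKey j i) <;>
    simp [c1, c2]

theorem pvLookup_sum' (d : PySem.Dict (List Char) Int) (k : List Char) (h : d.keys.Nodup) :
    (if d.contains k then d.getD k 0 else 0)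
      = (d.items.map (fun kv => if kv.1 = k then kv.2 else 0)).sum :=
  pvLookup_sum d.items k h

theorem pvC_eq (node : List Int) (t : Int × Int) (ht : t ∈ pairsL node) (kv : List Char × Int) :
    pvC node kv t = (if kv.1 = cfKey t.1 t.2 then kv.2 else 0)
      + (if kv.1 = cfKey t.2 t.1 then kv.2 else 0) := by
  have hts : (t.2, t.1) ∈ pairsL node := by
    rw [pvMem_pairsL] at ht ⊢; exact ⟨ht.2, ht.1⟩
  unfold pvC
  cases h : (pvSmap node).get? kv.1 with
  | none =>
    have n1 : ¬kv.1 = cfKey t.1 t.2 := fun he => by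
      rw [he] at h; rw [pvSmap_hit node t ht] at h; cases h
    have n2 : ¬kv.1 = cfKey t.2 t.1 := fun he => by
      rw [he] at h
      have := pvSmap_hit node (t.2, t.1) hts
      rw [this] at h; cases h
    simp [n1, n2]
  | some w =>
    obtain ⟨hw, hk⟩ := pvSmap_inv node _ _ h
    have d1 : t = w ↔ kv.1 = cfKey t.1 t.2 := by
      constructor
      · intro he; rw [hk, he]
      · intro he
        rw [hk] at he
        obtain ⟨a, b⟩ := pvCfKey_inj _ _ _ _ he
        exact Prod.ext a.symm b.symm
    have d2 : t = (w.2, w.1) ↔ kv.1 = cfKey t.2 t.1 := by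
      constructor
      · intro he
        rw [hk]
        have h1 : t.1 = w.2 := by rw [he]
        have h2 : t.2 = w.1 := by rw [he]
        rw [h1, h2]
      · intro he
        rw [hk] at he
        obtain ⟨a, b⟩ := pvCfKey_inj _ _ _ _ he
        exact Prod.ext b.symm a.symm
    simp [d1, d2]

theorem pvC_sum (node : List Int) (pc : PySem.Dict (List Char) Int) (hnd : pc.keys.Nodup)
    (t : Int × Int) (ht : t ∈ pairsL node) :
    (pc.items.map (fun kv => pvC node kv t)).sum = count_flow_helper t.1 t.2 pc := by
  rw [List.map_congr_left (fun kv _ => pvC_eq node t ht kv), List.sum_map_add,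
    ← pvLookup_sum' pc _ hnd, ← pvLookup_sum' pc _ hnd, pvHelper_eq]

/- ## the dicts are equal -/

theorem pvDicts_eq (node : List Int) (pair_count : List (String × Int)) :
    pvAD node (pvPC pair_count) = pvBD node (pvPC pair_count) := by
  set pc := pvPC pair_count with hpc
  have hnd : pc.keys.Nodup := PySem.Dict.nodup_keys_ofList _
  have keysAD : (pvAD node pc).keys = PySem.Set.update [] (pairsL node) := by
    rw [pvAD_flat, PySem.Dict.keys_foldl_insert, PySem.Dict.keys_empty]
  have nodupAD : (pvAD node pc).keys.Nodup := by
    rw [pvAD_flat]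
    exact PySem.Dict.nodup_keys_foldl_insert _ _ _ PySem.Dict.nodup_keys_empty
  have keysF0 : (pvFlow0 node).keys = PySem.Set.update [] (pairsL node) := by
    rw [pvFlow0_flat, PySem.Dict.keys_foldl_insert, PySem.Dict.keys_empty]
  have hcont0 : ∀ u ∈ pairsL node, (pvFlow0 node).contains u = true := by
    intro u hu
    rw [PySem.Dict.contains_iff_mem_keys, keysF0, PySem.Set.mem_update]
    exact Or.inr hu
  obtain ⟨kB, vB⟩ := pvScatter node pc.items (pvFlow0 node) hcont0
  have keysBD : (pvBD node pc).keys = PySem.Set.update [] (pairsL node) := by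
    rw [pvBD, kB, keysF0]
  have nodupBD : (pvBD node pc).keys.Nodup := by
    rw [keysBD, ← keysF0, pvFlow0_flat]
    exact PySem.Dict.nodup_keys_foldl_insert _ _ _ PySem.Dict.nodup_keys_empty
  have hval : ∀ t ∈ pairsL node, (pvAD node pc).getD t 0 = (pvBD node pc).getD t 0 := by
    intro t ht
    rw [pvAD_flat, pvFold_getD, if_pos ht]
    rw [pvBD, vB t, pvFlow0_flat, pvFold_getD, pvC_sum node pc hnd t ht]
    simp
  apply PySem.Dict.ext
  rw [PySem.Dict.items_eq_map_keys _ nodupAD 0, PySem.Dict.items_eq_map_keys _ nodupBD 0,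
    keysBD, ← keysAD]
  apply List.map_congr_left
  intro t htk
  have ht : t ∈ pairsL node := by
    rw [keysAD, PySem.Set.mem_update] at htk
    rcases htk with h | h
    · cases h
    · exact h
  rw [hval t ht]

theorem main_eq (node : List Int) (pair_count : List (String × Int)) :
    count_flow node pair_count = count_flow_alt node pair_count := by
  rw [pvCount_flow_eq, pvCount_flow_alt_eq, pvDicts_eq]

-- ===== VERDICT (by name: the statement is the Claim_ definition above) =====
theorem count_flow_spec : Claim_equal_count_flow := by
  intro node pair_count _
  exact main_eq node pair_count
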